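-- pv_equiv track=rewrite | github.com/pypi-data/pypi-mirror-349 | packages/kodosumi/kodosumi-0.9.1.tar.gz/kodosumi-0.9.1/apps/prime/calculator.py | get_prime_gaps_distribution
-- ===== SOURCE A (Python) =====
-- def is_prime(n: int) -> bool:
--     if n < 2:
--         return False
--     for i in range(2, int(n ** 0.5) + 1):
--         if n % i == 0:
--             return False
--     return True
--
-- def get_prime_gaps_distribution(lb: int, ub: int) -> tuple[int, dict[int, int]]:
--     if lb >= ub:
--         return 0, {}
--     primes = [n for n in range(lb, ub + 1) if is_prime(n)]
--     gaps: dict[int, int] = {}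
--     for i in range(len(primes) - 1):
--         gap = primes[i + 1] - primes[i]
--         gaps[gap] = gaps.get(gap, 0) + 1
--     return len(primes), gaps
-- ===== SOURCE B (Python) =====
-- def get_prime_gaps_distribution(lb: int, ub: int) -> tuple[int, dict[int, int]]:
--     if lb >= ub:
--         return 0, {}
--     count = 0
--     prev = 0
--     gaps: dict[int, int] = {}
--     for n in range(max(lb, 2), ub + 1):
--         if n % 2 == 0:
--             if n != 2:
--                 continue
--         else:
--             d = 3
--             composite = False
--             while d * d <= n:
--                 if n % d == 0:
--                     composite = True
--                     break
--                 d += 2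
--             if composite:
--                 continue
--         count += 1
--         if count > 1:
--             gaps[n - prev] = gaps.get(n - prev, 0) + 1
--         prev = n
--     return count, gaps
-- ===== Notes on version B (the rewrite author's own statement) =====
-- stated objective: alternative
-- what changed: Single fused pass from max(lb,2) tracking the previous prime and the gap counter directly (no intermediate primes list, no index loop), with an odd-only trial-division test (2 handled specially, divisors 3,5,7,... while d*d<=n) instead of a list comprehension filtered by a range(2,int(sqrt)+1) test followed by a second pass over index pairs.
import Mathlib
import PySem

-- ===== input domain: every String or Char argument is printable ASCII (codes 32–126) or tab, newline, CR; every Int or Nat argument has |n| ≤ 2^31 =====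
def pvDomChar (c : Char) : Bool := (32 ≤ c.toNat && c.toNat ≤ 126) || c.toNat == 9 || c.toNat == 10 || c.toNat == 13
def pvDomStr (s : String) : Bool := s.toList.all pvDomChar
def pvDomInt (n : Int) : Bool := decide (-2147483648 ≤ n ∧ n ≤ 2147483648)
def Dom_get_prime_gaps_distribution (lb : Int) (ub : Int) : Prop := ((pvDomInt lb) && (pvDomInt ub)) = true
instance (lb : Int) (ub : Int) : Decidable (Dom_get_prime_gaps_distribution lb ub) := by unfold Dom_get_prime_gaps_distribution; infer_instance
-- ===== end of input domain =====

-- B fuses prime counting and gap tabulation into one pass with an odd-only trial division (alternative decomposition, not measurably faster).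

-- ===== PORT A =====
-- int(n ** 0.5) is Nat.sqrt n.toNat exactly for 0 ≤ n ≤ 2^31 (the double sqrt is correctly
-- rounded and cannot cross an integer boundary at this magnitude); the n < 2 branch returns
-- first, so the float is only taken for n ≥ 2.
def pvIsPrime (n : Int) : Bool :=
  if n < 2 then false
  else (PySem.List.pyRange 2 ((Nat.sqrt n.toNat : Int) + 1) 1).all
        (fun i => !(PySem.Int.mod n i == 0))

-- primes[i+1] and primes[i]: both indices are in range for every i the loop visits,
-- so pyGetD with default 0 is exact.
def get_prime_gaps_distribution (lb : Int) (ub : Int) : Int × (List (Int × Int)) :=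
  if lb ≥ ub then (0, [])
  else
    let primes := (PySem.List.pyRange lb (ub + 1) 1).filter pvIsPrime
    let gaps := (PySem.List.pyRange 0 ((primes.length : Int) - 1) 1).foldl
      (fun (g : PySem.Dict Int Int) i =>
        let gap := PySem.List.pyGetD primes (i + 1) 0 - PySem.List.pyGetD primes i 0
        g.insert gap (g.getD gap 0 + 1)) PySem.Dict.empty
    ((primes.length : Int), gaps.items)

-- ===== PORT B =====
-- the 'while d * d <= n: … d += 2' loop of Source B; true iff a divisor is found (composite)
def pvTrial (n : Int) (d : Int) : Bool :=
  if h : d * d ≤ n then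
    if PySem.Int.mod n d == 0 then true
    else pvTrial n (d + 2)
  else false
termination_by (n + 2 - d).toNat
decreasing_by
  have h2 : d ≤ n := by
    by_cases hd : 0 < d
    · nlinarith [mul_nonneg (by omega : (0:Int) ≤ d - 1) (by omega : (0:Int) ≤ d)]
    · nlinarith [mul_self_nonneg d]
  omega

-- tail of Source B's loop body shared by both accepting branches:
-- count += 1; if count > 1: gaps[n-prev] += 1; prev = n     (state = (count, prev, gaps))
def pvAccept (st : Int × Int × PySem.Dict Int Int) (n : Int) : Int × Int × PySem.Dict Int Int :=
  let c := st.1 + 1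
  let g := if c > 1 then st.2.2.insert (n - st.2.1) (st.2.2.getD (n - st.2.1) 0 + 1) else st.2.2
  (c, n, g)

-- one iteration of Source B's for-loop over n
def pvStep (st : Int × Int × PySem.Dict Int Int) (n : Int) : Int × Int × PySem.Dict Int Int :=
  if PySem.Int.mod n 2 == 0 then
    if n == 2 then pvAccept st n else st
  else if pvTrial n 3 then st
  else pvAccept st n

def get_prime_gaps_distribution_alt (lb : Int) (ub : Int) : Int × (List (Int × Int)) :=
  if lb ≥ ub then (0, [])
  else
    let st := (PySem.List.pyRange (max lb 2) (ub + 1) 1).foldl pvStep (0, 0, PySem.Dict.empty)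
    (st.1, st.2.2.items)

-- ===== PRECONDITION & SPEC =====
def Spec_get_prime_gaps_distribution (lb : Int) (ub : Int) (out : Int × (List (Int × Int))) : Prop := out = get_prime_gaps_distribution_alt lb ub
instance (lb : Int) (ub : Int) (out : Int × (List (Int × Int))) : Decidable (Spec_get_prime_gaps_distribution lb ub out) := by unfold Spec_get_prime_gaps_distribution; infer_instance

-- ===== CLAIM (what is proved, stated in full; the proofs are below) =====
def Claim_equal_get_prime_gaps_distribution : Prop := ∀ (lb : Int) (ub : Int), Dom_get_prime_gaps_distribution lb ub → Spec_get_prime_gaps_distribution lb ub (get_prime_gaps_distribution lb ub)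

-- ===== LEMMAS AND PROOFS =====

-- A's trial-division test checks exactly the divisors 2 ≤ e with e * e ≤ n
theorem pvIsPrime_iff (n : Int) :
    pvIsPrime n = true ↔ 2 ≤ n ∧ ∀ e : Int, 2 ≤ e → e * e ≤ n → ¬ e ∣ n := by
  unfold pvIsPrime
  split_ifs with h
  · simp only [false_iff, not_and]
    intro h2; omega
  · rw [List.all_eq_true]
    constructor
    · intro hall
      refine ⟨by omega, ?_⟩
      intro e he hee hdvd
      have he0 : (e.toNat : Int) = e := Int.toNat_of_nonneg (by omega)
      have hn0 : (n.toNat : Int) = n := Int.toNat_of_nonneg (by omega)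
      have hnat : e.toNat * e.toNat ≤ n.toNat := by
        rw [← he0, ← hn0] at hee; exact_mod_cast hee
      have hs : (e.toNat : Int) ≤ (Nat.sqrt n.toNat : Int) :=
        Int.ofNat_le.mpr (Nat.le_sqrt.mpr hnat)
      have hmem : e ∈ PySem.List.pyRange 2 ((Nat.sqrt n.toNat : Int) + 1) 1 :=
        (PySem.List.mem_pyRange_one).mpr ⟨he, by omega⟩
      have := hall e hmem
      simp only [Bool.not_eq_true', beq_eq_false_iff_ne, ne_eq] at this
      rw [PySem.Int.mod_eq_zero_iff_dvd] at this
      exact this hdvd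
    · rintro ⟨h2, hprim⟩ i hi
      rw [PySem.List.mem_pyRange_one] at hi
      obtain ⟨hi2, hiu⟩ := hi
      have hi0 : (i.toNat : Int) = i := Int.toNat_of_nonneg (by omega)
      have hn0 : (n.toNat : Int) = n := Int.toNat_of_nonneg (by omega)
      have hs : i.toNat ≤ Nat.sqrt n.toNat := by omega
      have hnat : i.toNat * i.toNat ≤ n.toNat := Nat.le_sqrt.mp hs
      have hii : i * i ≤ n := by
        rw [← hi0, ← hn0]; exact_mod_cast hnat
      have := hprim i hi2 hii
      simp only [Bool.not_eq_true', beq_eq_false_iff_ne, ne_eq]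
      rw [PySem.Int.mod_eq_zero_iff_dvd]
      exact this

-- B's while loop checks exactly the odd divisors d ≤ e with e * e ≤ n
theorem pvTrial_false_iff (n d : Int) : 3 ≤ d → d % 2 = 1 →
    (pvTrial n d = false ↔ ∀ e : Int, d ≤ e → e % 2 = 1 → e * e ≤ n → ¬ e ∣ n) := by
  induction d using pvTrial.induct (n := n)
  case case1 d h hmod =>
    intro hd hodd
    rw [pvTrial, dif_pos h, if_pos hmod]
    simp only [Bool.true_eq_false, false_iff, not_forall]
    refine ⟨d, le_refl d, hodd, h, ?_⟩
    simp only [beq_iff_eq] at hmod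
    rw [← PySem.Int.mod_eq_zero_iff_dvd]
    simp [hmod]
  case case2 d h hmod ih =>
    intro hd hodd
    rw [pvTrial, dif_pos h, if_neg hmod]
    rw [ih (by omega) (by omega)]
    constructor
    · intro hall e he heo hee
      rcases eq_or_lt_of_le he with rfl | hlt
      · simp only [beq_iff_eq] at hmod
        rw [← PySem.Int.mod_eq_zero_iff_dvd]
        simpa using hmod
      · exact hall e (by omega) heo hee
    · intro hall e he heo hee
      exact hall e (by omega) heo hee
  case case3 d h =>
    intro hd hodd
    rw [pvTrial, dif_neg h]
    simp only [true_iff]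
    intro e he heo hee hdvd
    have : d * d ≤ e * e := mul_le_mul he he (by omega) (by omega)
    omega

-- for n ≥ 2, B's loop body accepts n exactly when A's primality test does
theorem pvStep_eq (st : Int × Int × PySem.Dict Int Int) (n : Int) (hn : 2 ≤ n) :
    pvStep st n = if pvIsPrime n then pvAccept st n else st := by
  have hm : PySem.Int.mod n 2 = n % 2 := PySem.Int.mod_eq_emod_of_pos (by norm_num)
  unfold pvStep
  simp only [hm, beq_iff_eq]
  by_cases hev : n % 2 = 0
  · by_cases h2n : n = 2
    · subst h2n
      have hp : pvIsPrime 2 = true := by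
        rw [pvIsPrime_iff]
        refine ⟨le_refl 2, ?_⟩
        intro e he hee _
        nlinarith
      simp [hp]
    · have h2 : (2:Int) ∣ n := Int.dvd_of_emod_eq_zero hev
      have hp : pvIsPrime n = false := by
        rw [Bool.eq_false_iff, Ne, pvIsPrime_iff]
        rintro ⟨-, hall⟩
        exact hall 2 (by omega) (by omega) h2
      simp [hev, h2n, hp]
  · have hnodd : ¬ (2:Int) ∣ n := by
      intro hd
      omega
    by_cases ht : pvTrial n 3 = true
    · have hp : pvIsPrime n = false := by
        rw [Bool.eq_false_iff, Ne, pvIsPrime_iff]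
        rintro ⟨-, hall⟩
        have := (pvTrial_false_iff n 3 (by omega) (by omega)).mpr
          (fun e he heo hee => hall e (by omega) hee)
        simp [ht] at this
      simp [hev, ht, hp]
    · rw [Bool.not_eq_true] at ht
      have hp : pvIsPrime n = true := by
        rw [pvIsPrime_iff]
        refine ⟨hn, ?_⟩
        intro e he hee hdvd
        rcases Int.emod_two_eq_zero_or_one e with heo | heo
        · exact hnodd (dvd_trans (Int.dvd_of_emod_eq_zero heo) hdvd)
        · exact (pvTrial_false_iff n 3 (by omega) (by omega)).mp ht e (by omega) heo hee hdvd
      simp [hev, ht, hp]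

-- numbers below 2 never pass A's test, so the scan may start at max(lb, 2)
theorem pvFilter_max (a b : Int) :
    (PySem.List.pyRange a b 1).filter pvIsPrime
      = (PySem.List.pyRange (max a 2) b 1).filter pvIsPrime := by
  have hlt : ∀ x : Int, x < 2 → pvIsPrime x = false := by
    intro x hx; unfold pvIsPrime; simp [hx]
  by_cases ha : 2 ≤ a
  · rw [max_eq_left ha]
  · rw [max_eq_right (by omega)]
    by_cases hb : b ≤ 2
    · rw [PySem.List.pyRange_one_eq_nil hb]
      simp only [List.filter_nil]
      rw [List.filter_eq_nil_iff]
      intro x hx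
      rw [PySem.List.mem_pyRange_one] at hx
      simp [hlt x (by omega)]
    · rw [PySem.List.pyRange_one_append a 2 b (by omega) (by omega), List.filter_append]
      have : (PySem.List.pyRange a 2 1).filter pvIsPrime = [] := by
        rw [List.filter_eq_nil_iff]
        intro x hx
        rw [PySem.List.mem_pyRange_one] at hx
        simp [hlt x (by omega)]
      rw [this, List.nil_append]

-- reference form of A's gap loop: walk adjacent pairs of the primes list
def pvGaps : List Int → PySem.Dict Int Int → PySem.Dict Int Int
  | a :: b :: t, g => pvGaps (b :: t) (g.insert (b - a) ((g.getD (b - a) 0) + 1))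
  | _, g => g

-- A's index loop over range(len(primes) - 1) is the adjacent-pair walk
theorem pvGapLoop_eq (P : List Int) (g : PySem.Dict Int Int) :
    (PySem.List.pyRange 0 ((P.length : Int) - 1) 1).foldl
      (fun (g : PySem.Dict Int Int) i =>
        let gap := PySem.List.pyGetD P (i + 1) 0 - PySem.List.pyGetD P i 0
        g.insert gap (g.getD gap 0 + 1)) g = pvGaps P g := by
  induction P, g using pvGaps.induct with
  | case1 a b t g ih =>
    have hlen : ((a :: b :: t).length : Int) - 1 = (t.length : Int) + 1 := by
      simp
    rw [hlen, PySem.List.pyRange_one_cons (by omega)]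
    rw [List.foldl_cons]
    have h1 : PySem.List.pyGetD (a :: b :: t) ((0:Int) + 1) 0 = b := by
      rw [show ((0:Int)+1) = ((1:Nat):Int) by norm_num, PySem.List.pyGetD_natCast]
      rfl
    have h0 : PySem.List.pyGetD (a :: b :: t) (0:Int) 0 = a := by
      rw [show ((0:Int)) = ((0:Nat):Int) by norm_num, PySem.List.pyGetD_natCast]
      rfl
    simp only [h1, h0]
    rw [PySem.List.pyRange_one, show ((t.length : Int) + 1 - (0+1)).toNat = t.length by omega,
        List.foldl_map]
    conv_rhs => rw [pvGaps]
    rw [← ih]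
    have hlen2 : ((b :: t).length : Int) - 1 = (t.length : Int) := by simp
    rw [hlen2, PySem.List.pyRange_one, show ((t.length : Int) - 0).toNat = t.length by omega,
        List.foldl_map]
    apply PySem.List.foldl_congr_mem
    intro acc k hk
    have e1 : (0:Int) + 1 + (k:Int) = ((k+1 : Nat) : Int) := by push_cast; ring
    have e3 : (0:Int) + (k:Int) = ((k : Nat) : Int) := by norm_num
    have e5 : ((k+1 : Nat) : Int) + 1 = ((k+2 : Nat) : Int) := by push_cast; ring
    have e6 : ((k : Nat) : Int) + 1 = ((k+1 : Nat) : Int) := by push_cast; ring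
    simp only [e1, e3, e5, e6, PySem.List.pyGetD_natCast, List.getD_cons_succ]
  | case2 P g h =>
    rcases P with _ | ⟨a, _ | ⟨b, t⟩⟩
    · rw [PySem.List.pyRange_one_eq_nil (by simp), List.foldl_nil]
      rfl
    · rw [PySem.List.pyRange_one_eq_nil (by simp), List.foldl_nil]
      rfl
    · exact absurd rfl (h a b t)

-- B's accepting fold over the primes list counts them and tabulates adjacent gaps
theorem pvAccept_fold (P : List Int) (c p : Int) (g : PySem.Dict Int Int) (hc : 1 ≤ c) :
    (P.foldl pvAccept (c, p, g)).1 = c + P.length ∧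
    (P.foldl pvAccept (c, p, g)).2.2 = pvGaps (p :: P) g := by
  induction P generalizing c p g with
  | nil => simp [pvGaps]
  | cons n t ih =>
    rw [List.foldl_cons]
    have ha : pvAccept (c, p, g) n
        = (c + 1, n, g.insert (n - p) (g.getD (n - p) 0 + 1)) := by
      unfold pvAccept
      simp only
      rw [if_pos (by omega : c + 1 > 1)]
    rw [ha]
    obtain ⟨h1, h2⟩ := ih (c+1) n (g.insert (n - p) (g.getD (n - p) 0 + 1)) (by omega)
    refine ⟨by rw [h1]; simp only [List.length_cons]; push_cast; ring, ?_⟩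
    rw [h2]
    conv_rhs => rw [pvGaps]

-- ===== VERDICT (by name: the statement is the Claim_ definition above) =====
theorem get_prime_gaps_distribution_spec : Claim_equal_get_prime_gaps_distribution := by
  intro lb ub _
  unfold Spec_get_prime_gaps_distribution
  unfold get_prime_gaps_distribution get_prime_gaps_distribution_alt
  by_cases h : lb ≥ ub
  · rw [if_pos h, if_pos h]
  · rw [if_neg h, if_neg h]
    simp only [pvFilter_max lb (ub + 1), pvGapLoop_eq]
    rw [PySem.List.foldl_congr_mem _ pvStep
      (fun st n => if pvIsPrime n then pvAccept st n else st) _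
      (fun st n hn => pvStep_eq st n (by
        rw [PySem.List.mem_pyRange_one] at hn
        have := le_max_right lb 2
        omega))]
    rw [← List.foldl_filter]
    rcases hP : (PySem.List.pyRange (max lb 2) (ub + 1) 1).filter pvIsPrime with _ | ⟨n, t⟩
    · rfl
    · rw [List.foldl_cons]
      have ha : pvAccept (0, 0, PySem.Dict.empty) n = (1, n, PySem.Dict.empty) := by
        unfold pvAccept
        norm_num
      obtain ⟨h1, h2⟩ := pvAccept_fold t 1 n PySem.Dict.empty (le_refl 1)
      rw [ha, h1, h2]
      congr 1
      simp only [List.length_cons]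
      push_cast
      ring
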